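-- pv_equiv track=rewrite | github.com/msys2/msys2-web | main.py | cleanup_files
-- ===== SOURCE A (Python) =====
-- from typing import List, Set, Dict, Tuple, Optional, Generator, Any, Type, Callable, Union
--
-- def cleanup_files(files: List[str]) -> List[str]:
--     """Remove redundant directory paths and root them"""
--
--     last = None
--     result = []
--     for path in sorted(files, reverse=True):
--         if last is not None:
--             if path.endswith("/") and last.startswith(path):
--                 continue
--         result.append("/" + path)
--         last = path
--     return result[::-1]
-- ===== SOURCE B (Python) =====
-- def cleanup_files(files):
--     """Remove redundant directory paths and root them"""
--     s = sorted(files)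
--     if not s:
--         return []
--     result = ["/" + cur for cur, nxt in zip(s, s[1:])
--               if not (cur.endswith("/") and nxt.startswith(cur))]
--     result.append("/" + s[-1])
--     return result
-- ===== Notes on version B (the rewrite author's own statement) =====
-- stated objective: simpler
-- what changed: Replaces the reverse-sorted stateful loop (running 'last' kept element, final list reversal) with an ascending sort and a stateless adjacent-pair lookahead: a path is dropped exactly when it ends in '/' and its immediate successor in sorted order extends it, so no state and no reversal are needed.
import Mathlib
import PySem

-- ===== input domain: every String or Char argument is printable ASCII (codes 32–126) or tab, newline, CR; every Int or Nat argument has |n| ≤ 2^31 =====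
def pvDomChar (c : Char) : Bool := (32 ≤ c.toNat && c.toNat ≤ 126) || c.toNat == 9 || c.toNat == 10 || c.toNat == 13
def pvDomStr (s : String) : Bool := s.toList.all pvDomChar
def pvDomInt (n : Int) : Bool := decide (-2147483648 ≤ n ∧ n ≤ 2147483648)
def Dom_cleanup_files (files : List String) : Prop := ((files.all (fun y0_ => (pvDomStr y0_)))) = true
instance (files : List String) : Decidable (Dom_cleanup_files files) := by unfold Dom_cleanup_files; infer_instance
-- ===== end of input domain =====

-- B replaces A's reverse-sorted loop with a running 'last' variable and a final reversal by an
-- ascending sort plus a stateless adjacent-pair lookahead (objective: simpler).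

-- ===== PORT A =====
-- loop state: 'last' is st.1, 'result' is st.2; branches in source order
def cleanup_files (files : List String) : List String :=
  ((PySem.List.sorted files (fun x => x) true).foldl
    (fun st path =>
      if (match st.1 with
          | some last => PySem.Str.endswith path "/" && PySem.Str.startswith last path
          | none => false)
      then st                                  -- continue
      else (some path, st.2 ++ ["/" ++ path]))
    (none, [])).2.reverse                       -- result[::-1] (= PySem.List.slice?_none_none_neg_one)

-- ===== PORT B =====
-- ascending sort; 'zip(s, s[1:])' filtered comprehension, then '/' + s[-1]; s[1:] = PySem.List.slice
def cleanup_files_alt (files : List String) : List String :=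
  let s := PySem.List.sorted files (fun x => x) false
  if hs : s = [] then []
  else
    ((s.zip (PySem.List.slice s (some 1) none)).filterMap
      (fun cn => if PySem.Str.endswith cn.1 "/" && PySem.Str.startswith cn.2 cn.1
                 then none else some ("/" ++ cn.1)))
    ++ ["/" ++ s.getLast hs]

-- ===== PRECONDITION & SPEC =====
def Spec_cleanup_files (files : List String) (out : List String) : Prop := out = cleanup_files_alt files
instance (files : List String) (out : List String) : Decidable (Spec_cleanup_files files out) := by unfold Spec_cleanup_files; infer_instance

-- ===== CLAIM (what is proved, stated in full; the proofs are below) =====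
def Claim_equal_cleanup_files : Prop := ∀ (files : List String), Dom_cleanup_files files → Spec_cleanup_files files (cleanup_files files)

-- ===== LEMMAS AND PROOFS =====

-- B's kept elements (unprefixed), by lookahead on the ascending sorted list
def bKeep : List String → List String
  | [] => []
  | [x] => [x]
  | x :: y :: r =>
      if PySem.Str.endswith x "/" && PySem.Str.startswith y x
      then bKeep (y :: r) else x :: bKeep (y :: r)

-- A's loop, rephrased as a right fold over the ascending list with a prepended result
def aStep (path : String) (st : Option String × List String) : Option String × List String :=
  if (match st.1 with
      | some last => PySem.Str.endswith path "/" && PySem.Str.startswith last path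
      | none => false)
  then st else (some path, path :: st.2)

theorem prefix_le (a b : List Char) (h : a <+: b) : a ≤ b := by
  induction a generalizing b with
  | nil =>
    cases b with
    | nil => exact le_refl _
    | cons y b => exact le_of_lt List.Lex.nil
  | cons x a ih =>
    obtain ⟨t, rfl⟩ := h
    rcases lt_or_eq_of_le (ih (a ++ t) ⟨t, rfl⟩) with h | h
    · exact le_of_lt (List.Lex.cons h)
    · exact le_of_eq (by rw [List.cons_append, ← h])

-- lexicographic squeeze: a ≤ b ≤ c and a prefix of c forces a prefix of b
theorem prefix_squeeze (a b c : List Char) (hac : a <+: c) (hab : a ≤ b) (hbc : b ≤ c) :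
    a <+: b := by
  induction a generalizing b c with
  | nil => exact List.nil_prefix
  | cons x a ih =>
    obtain ⟨t, rfl⟩ := hac
    cases b with
    | nil =>
      rcases lt_or_eq_of_le hab with h | h
      · cases h
      · cases h
    | cons y b =>
      have hab' : x < y ∨ (x = y ∧ a ≤ b) := by
        rcases lt_or_eq_of_le hab with h | h
        · cases h with
          | rel h => exact Or.inl h
          | cons h => exact Or.inr ⟨rfl, le_of_lt h⟩
        · injection h with h1 h2; subst h1; subst h2; exact Or.inr ⟨rfl, le_refl _⟩
      have hbc' : y < x ∨ (y = x ∧ b ≤ a ++ t) := by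
        rcases lt_or_eq_of_le hbc with h | h
        · cases h with
          | rel h => exact Or.inl h
          | cons h => exact Or.inr ⟨rfl, le_of_lt h⟩
        · injection h with h1 h2; subst h1; subst h2; exact Or.inr ⟨rfl, le_refl _⟩
      rcases hab' with h1 | ⟨rfl, h1⟩
      · rcases hbc' with h2 | ⟨rfl, h2⟩
        · exact absurd h1 (lt_asymm h2)
        · exact absurd h1 (lt_irrefl _)
      · rcases hbc' with h2 | ⟨-, h2⟩
        · exact absurd h2 (lt_irrefl _)
        · exact (List.prefix_cons_inj x).2 (ih b (a ++ t) ⟨t, rfl⟩ h1 h2)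

-- the main invariant: on an ascending list, A's right fold keeps exactly bKeep,
-- and the running 'last' is an extension (superstring) of the head
theorem keep_eq (s : List String) (hs : s.Pairwise (· ≤ ·)) :
    (s.foldr aStep (none, [])).2 = bKeep s ∧
      (∀ x r, s = x :: r → ∃ l, (s.foldr aStep (none, [])).1 = some l ∧ x.toList <+: l.toList) := by
  induction s with
  | nil => exact ⟨rfl, fun x r h => by cases h⟩
  | cons x s ih =>
    obtain ⟨ih1, ih2⟩ := ih (List.pairwise_cons.1 hs).2
    cases s with
    | nil =>
      refine ⟨rfl, fun z r h => ?_⟩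
      cases h
      exact ⟨x, rfl, List.prefix_refl _⟩
    | cons y r =>
      obtain ⟨l, hl, hyl⟩ := ih2 y r rfl
      have hxy : x ≤ y := (List.pairwise_cons.1 hs).1 y List.mem_cons_self
      have hcond : PySem.Str.startswith l x = PySem.Str.startswith y x := by
        have hyleq : y.toList ≤ l.toList := prefix_le _ _ hyl
        have hxyl : x.toList ≤ y.toList := String.le_iff_toList_le.1 hxy
        rw [PySem.Str.startswith_eq, PySem.Str.startswith_eq, Bool.eq_iff_iff]
        simp only [PySem.Chars.startswith_iff]
        exact ⟨fun h => prefix_squeeze _ _ _ h hxyl hyleq, fun h => h.trans hyl⟩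
      rcases hK : List.foldr aStep (none, []) (y :: r) with ⟨k1, k2⟩
      rw [hK] at ih1 hl
      have hk1 : k1 = some l := hl
      subst hk1
      have ih1' : k2 = bKeep (y :: r) := ih1
      have hfold : List.foldr aStep (none, []) (x :: y :: r) = aStep x (some l, k2) := by
        rw [List.foldr_cons, hK]
      rw [hfold]
      have hmatch : (match (some l : Option String) with
          | some last => PySem.Str.endswith x "/" && PySem.Str.startswith last x
          | none => false) = (PySem.Str.endswith x "/" && PySem.Str.startswith y x) := by
        simp only [hcond]
      simp only [aStep, hmatch]
      by_cases hc : (PySem.Str.endswith x "/" && PySem.Str.startswith y x) = true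
      · rw [if_pos hc]
        refine ⟨?_, ?_⟩
        · show k2 = bKeep (x :: y :: r)
          simp only [bKeep, if_pos hc]
          exact ih1'
        · intro z r' hzr
          cases hzr
          refine ⟨l, rfl, ?_⟩
          have h2 : PySem.Str.startswith y x = true := by
            simp only [Bool.and_eq_true] at hc; exact hc.2
          have h3 : PySem.Str.startswith l x = true := hcond.trans h2
          rw [PySem.Str.startswith_eq] at h3
          exact (PySem.Chars.startswith_iff _ _).1 h3
      · rw [if_neg hc]
        refine ⟨?_, ?_⟩
        · show x :: k2 = bKeep (x :: y :: r)
          simp only [bKeep, if_neg hc]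
          rw [ih1']
        · intro z r' hzr
          cases hzr
          exact ⟨x, rfl, List.prefix_refl _⟩

-- A's fold with appends equals the prepend version with a reversed result list
theorem foldA_rev (s : List String) :
    (s.reverse.foldl
      (fun st path =>
        if (match st.1 with
            | some last => PySem.Str.endswith path "/" && PySem.Str.startswith last path
            | none => false)
        then st
        else (some path, st.2 ++ ["/" ++ path]))
      ((none : Option String), ([] : List String))) =
      ((s.foldr aStep (none, [])).1,
        ((s.foldr aStep (none, [])).2.map (fun p => "/" ++ p)).reverse) := by
  rw [List.foldl_reverse]
  induction s with
  | nil => rfl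
  | cons x s ih =>
    simp only [List.foldr_cons, ih, aStep]
    cases hm : (match (s.foldr aStep (none, [])).1 with
          | some last => PySem.Str.endswith x "/" && PySem.Str.startswith last x
          | none => false) with
    | true => simp
    | false => simp

-- the reverse-sorted list is the reverse of the ascending-sorted list (equal strings are identical,
-- so Python's stable reverse=True sort coincides with reversing the ascending sort)
theorem sorted_rev_eq (files : List String) :
    PySem.List.sorted files (fun x => x) true =
      (PySem.List.sorted files (fun x => x) false).reverse := by
  refine List.Perm.eq_of_pairwise (le := fun a b : String => b ≤ a)
    (fun a b _ _ h h' => le_antisymm h' h)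
    (PySem.List.sorted_pairwise_rev files (fun x => x))
    ((List.pairwise_reverse).2 (PySem.List.sorted_pairwise files (fun x => x)))
    ?_
  exact (PySem.List.sorted_perm files _ true).trans
      ((PySem.List.sorted_perm files (fun x => x) false).symm.trans
        (List.reverse_perm _).symm)

-- B's zip-lookahead comprehension plus the final element computes the prefixed bKeep
theorem zipfm (rest : List String) : ∀ (x : String),
    (((x :: rest).zip (PySem.List.slice (x :: rest) (some 1) none)).filterMap
      (fun cn => if PySem.Str.endswith cn.1 "/" && PySem.Str.startswith cn.2 cn.1
                 then none else some ("/" ++ cn.1)))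
    ++ ["/" ++ (x :: rest).getLast (List.cons_ne_nil x rest)]
      = (bKeep (x :: rest)).map (fun p => "/" ++ p) := by
  induction rest with
  | nil => intro x; rfl
  | cons y r ih =>
    intro x
    have hslice : PySem.List.slice (x :: y :: r) (some 1) none = y :: r := by
      simp [PySem.List.slice_from]
    have hslice' : PySem.List.slice (y :: r) (some 1) none = r := by
      simp [PySem.List.slice_from]
    rw [hslice]
    have ihy := ih y
    rw [hslice'] at ihy
    have hlast : (x :: y :: r).getLast (List.cons_ne_nil x (y :: r)) =
        (y :: r).getLast (List.cons_ne_nil y r) := by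
      simp [List.getLast_cons]
    rw [List.zip_cons_cons, List.filterMap_cons, hlast]
    by_cases hc : (PySem.Str.endswith x "/" && PySem.Str.startswith y x) = true
    · simp only [if_pos hc, bKeep, ihy]
    · simp only [if_neg hc, bKeep]
      rw [List.cons_append, ihy]
      rfl

-- B's port computes the prefixed bKeep of the ascending sorted list
theorem alt_eq_bKeep (files : List String) :
    cleanup_files_alt files =
      (bKeep (PySem.List.sorted files (fun x => x) false)).map (fun p => "/" ++ p) := by
  unfold cleanup_files_alt
  cases h : PySem.List.sorted files (fun x => x) false with
  | nil => rfl
  | cons x rest =>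
    rw [dif_neg (List.cons_ne_nil x rest)]
    exact zipfm rest x

-- ===== VERDICT (by name: the statement is the Claim_ definition above) =====
theorem cleanup_files_spec : Claim_equal_cleanup_files := by
  intro files _
  show cleanup_files files = cleanup_files_alt files
  unfold cleanup_files
  rw [sorted_rev_eq, foldA_rev, alt_eq_bKeep]
  simp only [List.reverse_reverse]
  rw [(keep_eq _ (PySem.List.sorted_pairwise files (fun x => x))).1]
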